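-- pv_equiv track=rewrite | github.com/hkad98/problem_solver | sentence_functions.py | change_copy
-- ===== SOURCE A (Python) =====
-- from typing import List, Dict, TYPE_CHECKING, Set
--
-- def change_copy(sentence_copy: List, lines: List, subst, index: str) -> List:
--     """
--     Helper function for substitute. Removes redundant words. And change the unknown number by known.
--     :param sentence_copy: Copy of sentence.
--     :param lines: Redundant words.
--     :param subst: Substitution.
--     :param index: Index of substitute number.
--     :return: Changed sentence with new number.
--     """
--     result = []
--     for x in sentence_copy:
--         if x[0] not in lines:
--             result.append(x)
--     for y in result:
--         if y[0] == index:
--             y[1] = str(int(subst))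
--             y[2] = str(int(subst))
--             break
--     return result
-- ===== SOURCE B (Python) =====
-- def change_copy(sentence_copy, lines, subst, index):
--     """Single fused pass: filter redundant words and substitute at the first
--     non-redundant match in one traversal (mutates the kept element in place,
--     like the original)."""
--     result = []
--     substituted = False
--     for x in sentence_copy:
--         if x[0] in lines:
--             continue
--         result.append(x)
--         if not substituted and x[0] == index:
--             v = str(int(subst))
--             x[1] = v
--             x[2] = v
--             substituted = True
--     return result
-- ===== Notes on version B (the rewrite author's own statement) =====
-- stated objective: simpler
-- what changed: Fuses A's two passes (filter, then search-and-mutate with break) into a single traversal that keeps a 'substituted' flag, so the intermediate list is walked once instead of twice.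
import Mathlib
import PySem

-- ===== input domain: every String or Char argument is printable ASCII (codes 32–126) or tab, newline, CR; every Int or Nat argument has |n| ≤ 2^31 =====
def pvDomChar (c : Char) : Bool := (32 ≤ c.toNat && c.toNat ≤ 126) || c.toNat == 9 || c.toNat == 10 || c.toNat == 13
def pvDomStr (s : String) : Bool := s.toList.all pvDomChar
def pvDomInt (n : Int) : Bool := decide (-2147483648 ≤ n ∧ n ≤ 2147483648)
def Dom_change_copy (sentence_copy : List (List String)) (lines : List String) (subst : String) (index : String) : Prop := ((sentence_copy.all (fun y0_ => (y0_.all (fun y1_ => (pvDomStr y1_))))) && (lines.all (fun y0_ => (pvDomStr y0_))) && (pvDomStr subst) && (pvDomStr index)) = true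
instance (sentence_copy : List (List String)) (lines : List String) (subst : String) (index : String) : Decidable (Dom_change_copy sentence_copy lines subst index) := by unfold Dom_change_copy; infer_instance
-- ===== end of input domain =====

-- B fuses A's two passes (filter, then search-and-mutate-first-match) into one traversal with
-- a 'substituted' flag; 'simpler' objective. NOTE: the Python programs mutate the matched inner
-- list of sentence_copy in place (both A and B do the same mutation); the equivalence proved
-- here is about the RETURN value.

-- ===== PORT A =====
-- second loop of A: substitute at the first y with y[0] == index, then break
def chSub (subst index : String) : List (List String) → List (List String)
  | [] => []
  | y :: rest =>
    if (y.getD 0 "") == index then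
      ((y.set 1 (PySem.Int.toStr ((PySem.Int.ofStr? subst).getD 0))).set 2
        (PySem.Int.toStr ((PySem.Int.ofStr? subst).getD 0))) :: rest
    else y :: chSub subst index rest

def change_copy (sentence_copy : List (List String)) (lines : List String) (subst : String) (index : String) : List (List String) :=
  -- first loop: result = [x for x in sentence_copy if x[0] not in lines]
  let result := sentence_copy.foldl
    (fun acc x => if !(lines.contains (x.getD 0 "")) then acc ++ [x] else acc) []
  chSub subst index result

-- ===== PORT B =====
def altGo (lines : List String) (subst index : String) : List (List String) → Bool → List (List String)
  | [], _ => []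
  | x :: rest, substituted =>
    if lines.contains (x.getD 0 "") then altGo lines subst index rest substituted
    else if !substituted && ((x.getD 0 "") == index) then
      let v := PySem.Int.toStr ((PySem.Int.ofStr? subst).getD 0)
      ((x.set 1 v).set 2 v) :: altGo lines subst index rest true
    else x :: altGo lines subst index rest substituted

def change_copy_alt (sentence_copy : List (List String)) (lines : List String) (subst : String) (index : String) : List (List String) :=
  altGo lines subst index sentence_copy false

-- ===== PRECONDITION & SPEC =====
-- Pre_ excludes exactly the inputs where the Python raises: an empty inner list (x[0] is an
-- IndexError), and a first kept match y with fewer than 3 fields (y[1]/y[2] assignment raises)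
-- or a subst that int() rejects (ValueError).
def Pre_change_copy (sentence_copy : List (List String)) (lines : List String) (subst : String) (index : String) : Prop :=
  (sentence_copy.all (fun x => !x.isEmpty)
   && (((sentence_copy.filter (fun x => !(lines.contains (x.getD 0 "")))).find?
          (fun y => (y.getD 0 "") == index)).all
        (fun y => decide (3 ≤ y.length) && (PySem.Int.ofStr? subst).isSome))) = true
instance (sentence_copy : List (List String)) (lines : List String) (subst : String) (index : String) : Decidable (Pre_change_copy sentence_copy lines subst index) := by unfold Pre_change_copy; infer_instance

def pvWitness_change_copy : List (List String) × List String × String × String :=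
  ([["2", "x", "y"], ["a"]], ["a"], "5", "2")

def Spec_change_copy (sentence_copy : List (List String)) (lines : List String) (subst : String) (index : String) (out : List (List String)) : Prop := out = change_copy_alt sentence_copy lines subst index
instance (sentence_copy : List (List String)) (lines : List String) (subst : String) (index : String) (out : List (List String)) : Decidable (Spec_change_copy sentence_copy lines subst index out) := by unfold Spec_change_copy; infer_instance

-- ===== CLAIM (what is proved, stated in full; the proofs are below) =====
def Claim_equal_change_copy : Prop := ∀ (sentence_copy : List (List String)) (lines : List String) (subst : String) (index : String), Dom_change_copy sentence_copy lines subst index → Pre_change_copy sentence_copy lines subst index → Spec_change_copy sentence_copy lines subst index (change_copy sentence_copy lines subst index)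

-- ===== LEMMAS AND PROOFS =====

-- once the flag is set, B's pass is exactly the filter
theorem altGo_true (lines : List String) (subst index : String) (sc : List (List String)) :
    altGo lines subst index sc true = sc.filter (fun x => !(lines.contains (x.getD 0 ""))) := by
  induction sc with
  | nil => rfl
  | cons x rest ih =>
    cases h : lines.contains (x.getD 0 "") <;>
      simp only [altGo, List.filter_cons, h, ih] <;> simp

-- B with flag unset = A's second pass applied to the filtered list
theorem altGo_false (lines : List String) (subst index : String) (sc : List (List String)) :
    altGo lines subst index sc false
      = chSub subst index (sc.filter (fun x => !(lines.contains (x.getD 0 "")))) := by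
  induction sc with
  | nil => rfl
  | cons x rest ih =>
    cases h : lines.contains (x.getD 0 "") with
    | true =>
        simp only [altGo, List.filter_cons, h, ih]; simp
    | false =>
        cases hm : (x.getD 0 "" == index) with
        | true =>
            have hm' : x[0]?.getD "" = index := by simpa [List.getD_eq_getElem?_getD] using hm
            simp only [altGo, List.filter_cons, h, hm, altGo_true]
            rw [chSub.eq_def]; simp [hm']
        | false =>
            have hm' : ¬ x[0]?.getD "" = index := by simpa [List.getD_eq_getElem?_getD] using hm
            simp only [altGo, List.filter_cons, h, hm]
            rw [chSub.eq_def]; simp [hm', ih]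

-- ===== VERDICT (by name: the statement is the Claim_ definition above) =====
theorem change_copy_spec : Claim_equal_change_copy := by
  intro sc lines subst index _ _
  show change_copy sc lines subst index = change_copy_alt sc lines subst index
  unfold change_copy change_copy_alt
  rw [PySem.List.foldl_append_if_eq_filter, altGo_false]
  rfl
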